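-- pv_equiv track=rewrite | github.com/ASNKMGSK/GongMo | V2-agentcore-a2a-workshop/packages/agentcore-agents/qa-pipeline/v2/judge_agent.py | _or_merge_override
-- ===== SOURCE A (Python) =====
-- from typing import Any
--
-- def _or_merge_override(persona_outputs: dict[str, dict[str, Any]]) -> str | None:
--     """persona 별 override_hint 중 가장 심각한 것 채택 (privacy > profanity > misinfo)."""
--     priority = ("privacy_leak", "profanity", "uncorrected_misinfo")
--     hints = {
--         (out.get("override_hint") if out else None) for out in persona_outputs.values()
--     }
--     for p in priority:
--         if p in hints:
--             return p
--     return None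
-- ===== SOURCE B (Python) =====
-- def _or_merge_override(persona_outputs):
--     """persona 별 override_hint 중 가장 심각한 것 채택 (privacy > profanity > misinfo)."""
--     priority = ("privacy_leak", "profanity", "uncorrected_misinfo")
--     best = None
--     for out in persona_outputs.values():
--         h = out.get("override_hint") if out else None
--         if h in priority:
--             i = priority.index(h)
--             if best is None or i < best:
--                 best = i
--     return priority[best] if best is not None else None
-- ===== Notes on version B (the rewrite author's own statement) =====
-- stated objective: alternative
-- what changed: Replaces A's 'collect all hints into a set, then scan the priority tuple for the first member' with a single pass over the values that maintains the minimum priority index seen, eliminating the intermediate set.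
import Mathlib
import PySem

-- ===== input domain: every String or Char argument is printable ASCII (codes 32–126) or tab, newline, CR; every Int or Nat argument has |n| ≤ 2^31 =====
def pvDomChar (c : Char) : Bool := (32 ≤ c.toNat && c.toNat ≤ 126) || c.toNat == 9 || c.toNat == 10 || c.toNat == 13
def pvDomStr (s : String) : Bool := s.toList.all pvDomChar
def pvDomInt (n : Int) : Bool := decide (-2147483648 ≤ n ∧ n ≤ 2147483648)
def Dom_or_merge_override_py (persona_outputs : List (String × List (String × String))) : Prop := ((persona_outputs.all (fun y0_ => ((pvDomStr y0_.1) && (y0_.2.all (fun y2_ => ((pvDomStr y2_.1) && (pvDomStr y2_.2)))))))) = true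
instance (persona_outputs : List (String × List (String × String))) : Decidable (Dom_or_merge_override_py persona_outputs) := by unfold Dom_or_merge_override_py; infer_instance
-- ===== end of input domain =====

-- B replaces A's "collect a set of hints, then scan the priority tuple" with one pass over the
-- values maintaining the minimum priority index seen (objective: alternative decomposition).

-- ===== PORT A =====
-- h = out.get("override_hint") if out else None
def pvHintA (out : List (String × String)) : Option String :=
  if out = [] then none else PySem.Dict.get? (PySem.Dict.ofList out) "override_hint"

-- for p in priority: if p in hints: return p / return None
def pvScanA (hints : PySem.Set (Option String)) : List String → Option String
  | [] => none
  | p :: ps => if PySem.Set.contains hints (some p) then some p else pvScanA hints ps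

def or_merge_override_py (persona_outputs : List (String × List (String × String))) : Option String :=
  let priority : List String := ["privacy_leak", "profanity", "uncorrected_misinfo"]
  let hints : PySem.Set (Option String) :=
    PySem.Set.ofList ((PySem.Dict.ofList persona_outputs).values.map pvHintA)
  pvScanA hints priority

-- ===== PORT B =====
def pvHintB (out : List (String × String)) : Option String :=
  if out = [] then none else PySem.Dict.get? (PySem.Dict.ofList out) "override_hint"

-- loop body: if h in priority: i = priority.index(h); if best is None or i < best: best = i
def pvStepB (priority : List String) (best : Option Int) (h : Option String) : Option Int :=
  match h with
  | none => best
  | some s =>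
    if priority.contains s then
      match PySem.List.index? priority s with
      | none => best
      | some i =>
        match best with
        | none => some i
        | some b => if i < b then some i else some b
    else best

def or_merge_override_py_alt (persona_outputs : List (String × List (String × String))) : Option String :=
  let priority : List String := ["privacy_leak", "profanity", "uncorrected_misinfo"]
  let best : Option Int :=
    (PySem.Dict.ofList persona_outputs).values.foldl
      (fun best out => pvStepB priority best (pvHintB out)) none
  match best with
  | none => none
  | some b => PySem.List.pyGet? priority b

-- ===== PRECONDITION & SPEC =====
def Spec_or_merge_override_py (persona_outputs : List (String × List (String × String))) (out : Option String) : Prop := out = or_merge_override_py_alt persona_outputs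
instance (persona_outputs : List (String × List (String × String))) (out : Option String) : Decidable (Spec_or_merge_override_py persona_outputs out) := by unfold Spec_or_merge_override_py; infer_instance

-- ===== CLAIM (what is proved, stated in full; the proofs are below) =====
def Claim_equal_or_merge_override_py : Prop := ∀ (persona_outputs : List (String × List (String × String))), Dom_or_merge_override_py persona_outputs → Spec_or_merge_override_py persona_outputs (or_merge_override_py persona_outputs)

-- ===== LEMMAS AND PROOFS =====

def pvPri : List String := ["privacy_leak", "profanity", "uncorrected_misinfo"]

def pvOmin : Option Int → Option Int → Option Int
  | none, b => b
  | some a, none => some a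
  | some a, some b => some (min a b)

def pvCand (h : Option String) : Option Int :=
  if h = some "privacy_leak" then some 0
  else if h = some "profanity" then some 1
  else if h = some "uncorrected_misinfo" then some 2
  else none

lemma pvIdx1 : List.idxOf? "privacy_leak" ["privacy_leak", "profanity", "uncorrected_misinfo"] = some 0 := by decide
lemma pvIdx2 : List.idxOf? "profanity" ["privacy_leak", "profanity", "uncorrected_misinfo"] = some 1 := by decide
lemma pvIdx3 : List.idxOf? "uncorrected_misinfo" ["privacy_leak", "profanity", "uncorrected_misinfo"] = some 2 := by decide

lemma pvStepB_eq_omin (best : Option Int) (h : Option String) :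
    pvStepB pvPri best h = pvOmin best (pvCand h) := by
  rcases h with _|s
  · cases best <;> rfl
  · by_cases h1 : s = "privacy_leak"
    · subst h1
      rcases best with _|b
      · decide
      · simp [pvStepB, pvCand, pvOmin, pvPri, Int.min_def, pvIdx1]
        split_ifs <;> first | rfl | omega
    · by_cases h2 : s = "profanity"
      · subst h2
        rcases best with _|b
        · decide
        · simp [pvStepB, pvCand, pvOmin, pvPri, Int.min_def, pvIdx2]
          split_ifs <;> first | rfl | omega
      · by_cases h3 : s = "uncorrected_misinfo"
        · subst h3
          rcases best with _|b
          · decide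
          · simp [pvStepB, pvCand, pvOmin, pvPri, Int.min_def, pvIdx3]
            split_ifs <;> first | rfl | omega
        · rcases best with _|b <;> simp [pvStepB, pvCand, pvOmin, pvPri, h1, h2, h3]

lemma pvOmin_none_left (b : Option Int) : pvOmin none b = b := rfl

lemma pvOmin_assoc (a b c : Option Int) : pvOmin (pvOmin a b) c = pvOmin a (pvOmin b c) := by
  rcases a with _|a <;> rcases b with _|b <;> rcases c with _|c <;>
    simp [pvOmin, min_assoc]

lemma pvFoldl_eq_omin (hs : List (Option String)) (best : Option Int) :
    hs.foldl (pvStepB pvPri) best = pvOmin best (hs.foldl (pvStepB pvPri) none) := by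
  induction hs generalizing best with
  | nil => cases best <;> simp [pvOmin]
  | cons h hs ih =>
    simp only [List.foldl_cons, pvStepB_eq_omin]
    rw [ih (pvOmin best (pvCand h)), ih (pvOmin none (pvCand h))]
    rw [pvOmin_none_left, pvOmin_assoc]

lemma pvFoldl_char (hs : List (Option String)) :
    hs.foldl (pvStepB pvPri) none =
      if some "privacy_leak" ∈ hs then some 0
      else if some "profanity" ∈ hs then some 1
      else if some "uncorrected_misinfo" ∈ hs then some 2
      else none := by
  induction hs with
  | nil => rfl
  | cons h hs ih =>
    rw [List.foldl_cons, pvFoldl_eq_omin, ih, pvStepB_eq_omin, pvOmin_none_left]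
    simp only [List.mem_cons]
    by_cases e1 : h = some "privacy_leak" <;> by_cases e2 : h = some "profanity" <;>
      by_cases e3 : h = some "uncorrected_misinfo" <;>
      simp_all [pvCand, pvOmin] <;> split_ifs <;> simp_all

lemma pvContains_ofList (hs : List (Option String)) (p : String) :
    PySem.Set.contains (PySem.Set.ofList hs) (some p) = decide (some p ∈ hs) := by
  simp [PySem.Set.contains, PySem.Set.mem_ofList]

theorem pv_main (po : List (String × List (String × String))) :
    or_merge_override_py po = or_merge_override_py_alt po := by
  show pvScanA (PySem.Set.ofList (List.map pvHintA (PySem.Dict.ofList po).values)) pvPri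
      = match List.foldl (fun best out => pvStepB pvPri best (pvHintA out)) none
          (PySem.Dict.ofList po).values with
        | none => none
        | some b => PySem.List.pyGet? pvPri b
  rw [← List.foldl_map, pvFoldl_char]
  simp only [pvPri, pvScanA, pvContains_ofList]
  split_ifs <;> first | rfl | decide | simp_all

-- ===== VERDICT (by name: the statement is the Claim_ definition above) =====
theorem or_merge_override_py_spec : Claim_equal_or_merge_override_py := by
  intro po _
  unfold Spec_or_merge_override_py
  exact pv_main po
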